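-- pv_equiv track=rewrite | github.com/nexon33/voynich-grammar-analysis | scripts/phase3/test_multi_vowel_mappings.py | generate_variants_multi_vowel
-- ===== SOURCE A (Python) =====
-- from itertools import product
--
-- def generate_variants_eo_only(word, max_variants=32):
--     """Generate variants with e↔o only (baseline)."""
--     word_clean = word.lower().strip(".,;:!?")
--
--     eo_positions = [(i, c) for i, c in enumerate(word_clean) if c in ["e", "o"]]
--
--     if len(eo_positions) > 5:
--         return [
--             word_clean,
--             word_clean.replace("o", "e"),
--             word_clean.replace("e", "o"),
--         ]
--
--     variants = set()
--     for combination in product(["e", "o"], repeat=len(eo_positions)):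
--         variant = list(word_clean)
--         for (pos, _), new_char in zip(eo_positions, combination):
--             variant[pos] = new_char
--         variants.add("".join(variant))
--         if len(variants) >= max_variants:
--             break
--
--     return list(variants)
--
-- def generate_variants_multi_vowel(word, max_variants=128):
--     """
--     Generate variants with multiple vowel substitutions:
--     - e ↔ o (existing)
--     - a ↔ e (new)
--     - i ↔ y (new)
--     """
--     word_clean = word.lower().strip(".,;:!?")
--
--     # Find positions for each vowel pair
--     substitutions = {
--         "e": ["e", "o", "a"],  # e can become o or a
--         "o": ["o", "e"],  # o can become e
--         "a": ["a", "e"],  # a can become e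
--         "i": ["i", "y"],  # i can become y
--         "y": ["y", "i"],  # y can become i
--     }
--
--     # Build list of (position, possible_chars)
--     positions = []
--     for i, char in enumerate(word_clean):
--         if char in substitutions:
--             positions.append((i, substitutions[char]))
--         else:
--             positions.append((i, [char]))
--
--     # Limit combinatorial explosion
--     total_combinations = 1
--     for pos, chars in positions:
--         total_combinations *= len(chars)
--
--     if total_combinations > max_variants:
--         # Just try e↔o only
--         return generate_variants_eo_only(word, max_variants)
--
--     # Generate all combinations
--     variants = set()
--     for combo in product(*[chars for _, chars in positions]):
--         variant = "".join(combo)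
--         variants.add(variant)
--         if len(variants) >= max_variants:
--             break
--
--     return list(variants)
-- ===== SOURCE B (Python) =====
-- _SUBS = {"e": "eoa", "o": "oe", "a": "ae", "i": "iy", "y": "yi"}
--
--
-- def _decode(parts, k):
--     """Mixed-radix decoding: the digits of k (big-endian, radix len(p) per slot),
--     mapped through the candidate strings.  The k-th variant is computed directly
--     from its index k, so no Cartesian-product enumeration is ever materialised."""
--     out = []
--     for p in reversed(parts):
--         out.append(p[k % len(p)])
--         k //= len(p)
--     out.reverse()
--     return out
--
--
-- def _eo_fallback(w, max_variants):
--     pos = [i for i, c in enumerate(w) if c in "eo"]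
--     n = len(pos)
--     if n > 5:
--         return [w, w.replace("o", "e"), w.replace("e", "o")]
--     limit = min(2 ** n, max(max_variants, 1))
--     out = []
--     for k in range(limit):
--         chars = list(w)
--         for p, c in zip(pos, _decode(["eo"] * n, k)):
--             chars[p] = c
--         out.append("".join(chars))
--     return out
--
--
-- def generate_variants_multi_vowel(word, max_variants=128):
--     w = word.lower().strip(".,;:!?")
--     parts = [_SUBS.get(c, c) for c in w]
--     total = 1
--     for p in parts:
--         total *= len(p)
--     if total > max_variants:
--         return _eo_fallback(w, max_variants)
--     return ["".join(_decode(parts, k)) for k in range(total)]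
-- ===== Notes on version B (the rewrite author's own statement) =====
-- stated objective: alternative
-- what changed: B never enumerates the Cartesian product: it computes the k-th variant directly from its index k by mixed-radix (divmod) digit decoding for k in range(total), replacing A's itertools.product + set accumulator + in-loop break (and replacing the break in the e/o fallback by a closed-form range bound min(2**n, max(max_variants,1))).
import Mathlib
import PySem

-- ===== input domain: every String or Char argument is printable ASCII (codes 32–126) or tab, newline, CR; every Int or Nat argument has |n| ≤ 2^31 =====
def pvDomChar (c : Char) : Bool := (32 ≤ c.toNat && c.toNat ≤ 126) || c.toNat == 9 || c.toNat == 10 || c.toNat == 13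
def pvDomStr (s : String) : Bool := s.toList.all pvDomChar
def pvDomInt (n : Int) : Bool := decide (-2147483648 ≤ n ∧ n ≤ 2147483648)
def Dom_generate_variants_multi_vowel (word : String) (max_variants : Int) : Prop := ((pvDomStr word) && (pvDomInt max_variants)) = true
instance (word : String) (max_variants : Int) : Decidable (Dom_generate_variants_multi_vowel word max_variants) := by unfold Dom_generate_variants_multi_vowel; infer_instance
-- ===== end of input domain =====

-- B replaces A's Cartesian-product enumeration (itertools.product + set + in-loop break) by direct
-- mixed-radix index decoding: the k-th variant is computed from the integer k by divmod digit
-- extraction, for k in range(total) (truncated in closed form in the e/o fallback); same variants.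
-- Python A returns list(variants) of a set, whose hash iteration order is not modelled: both
-- ports return the variants in insertion order (all inserted variants are distinct), and the
-- Python outputs are compared as sets.

-- ===== PORT A =====
-- the 'substitutions' dict of A
def pvSubsA : PySem.Dict Char (List Char) := PySem.Dict.ofList
  [('e', ['e','o','a']), ('o', ['o','e']), ('a', ['a','e']), ('i', ['i','y']), ('y', ['y','i'])]

-- itertools.product over a list of candidate lists (first coordinate varies slowest)
def pvProductA : List (List Char) → List (List Char)
  | [] => [[]]
  | l :: ls => l.flatMap (fun x => (pvProductA ls).map (fun r => x :: r))

-- A's 'variants = set(); for …: variants.add(g …); if len(variants) >= max_variants: break' loop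
def pvAddLoop {α : Type} (max_variants : Int) (g : α → String) :
    List α → PySem.Set String → PySem.Set String
  | [], vs => vs
  | c :: cs, vs =>
      let vs' := PySem.Set.add vs (g c)
      if max_variants ≤ PySem.Set.len vs' then vs' else pvAddLoop max_variants g cs vs'

-- 'for (pos, _), new_char in zip(eo_positions, combination): variant[pos] = new_char'
def pvAssignA (w0 : List Char) (pcs : List ((Int × Char) × Char)) : List Char :=
  pcs.foldl (fun v pc => PySem.List.pySetD v pc.1.1 pc.2) w0

def generate_variants_eo_only (word : String) (max_variants : Int) : List String :=
  let wc := PySem.Str.stripChars (PySem.Str.lower word) ".,;:!?"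
  let eo := (PySem.List.enumerate wc.toList).filter (fun p => p.2 == 'e' || p.2 == 'o')
  if 5 < (eo.length : Int) then
    [wc, PySem.Str.replace wc "o" "e", PySem.Str.replace wc "e" "o"]
  else
    pvAddLoop max_variants
      (fun combo => String.ofList (pvAssignA wc.toList (eo.zip combo)))
      (pvProductA (List.replicate eo.length ['e','o'])) []

def generate_variants_multi_vowel (word : String) (max_variants : Int) : List String :=
  let wc := PySem.Str.stripChars (PySem.Str.lower word) ".,;:!?"
  let positions := (PySem.List.enumerate wc.toList).map
    (fun p => if pvSubsA.contains p.2 then (p.1, pvSubsA.getD p.2 []) else (p.1, [p.2]))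
  let total := positions.foldl (fun acc p => acc * (p.2.length : Int)) 1
  if max_variants < total then generate_variants_eo_only word max_variants
  else
    pvAddLoop max_variants (fun combo => String.ofList combo)
      (pvProductA (positions.map (·.2))) []

-- ===== PORT B =====
-- Source B's _SUBS (values are the candidate character strings, as char lists)
def pvSubsB : PySem.Dict Char (List Char) := PySem.Dict.ofList
  [('e', ['e','o','a']), ('o', ['o','e']), ('a', ['a','e']), ('i', ['i','y']), ('y', ['y','i'])]

-- Source B's _decode: 'out = []; for p in reversed(parts): out.append(p[k % len(p)]); k //= len(p);
-- out.reverse(); return out'.  p[k % len(p)] is in range whenever p ≠ [] (every parts entry is),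
-- so the .getD ' ' default is never used.
def pvDecode (parts : List (List Char)) (k : Int) : List Char :=
  ((parts.reverse.foldl
      (fun (s : List Char × Int) p =>
        (s.1 ++ [(PySem.List.pyGet? p (PySem.Int.mod s.2 (p.length : Int))).getD ' '],
         PySem.Int.floordiv s.2 (p.length : Int)))
      ([], k)).1).reverse

-- Source B's _eo_fallback
def pvEoFallback (w : String) (max_variants : Int) : List String :=
  let pos := ((PySem.List.enumerate w.toList).filter (fun p => p.2 == 'e' || p.2 == 'o')).map (·.1)
  let n := pos.length
  if 5 < (n : Int) then
    [w, PySem.Str.replace w "o" "e", PySem.Str.replace w "e" "o"]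
  else
    let limit := min ((2 : Int) ^ n) (max max_variants 1)
    (PySem.List.pyRange 0 limit 1).map (fun k =>
      String.ofList ((pos.zip (pvDecode (List.replicate n ['e','o']) k)).foldl
        (fun chars pc => PySem.List.pySetD chars pc.1 pc.2) w.toList))

def generate_variants_multi_vowel_alt (word : String) (max_variants : Int) : List String :=
  let w := PySem.Str.stripChars (PySem.Str.lower word) ".,;:!?"
  let parts := w.toList.map (fun c => pvSubsB.getD c [c])
  let total := parts.foldl (fun acc p => acc * (p.length : Int)) 1
  if max_variants < total then pvEoFallback w max_variants
  else (PySem.List.pyRange 0 total 1).map (fun k => String.ofList (pvDecode parts k))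

-- ===== PRECONDITION & SPEC =====
def Spec_generate_variants_multi_vowel (word : String) (max_variants : Int) (out : List String) : Prop := out = generate_variants_multi_vowel_alt word max_variants
instance (word : String) (max_variants : Int) (out : List String) : Decidable (Spec_generate_variants_multi_vowel word max_variants out) := by unfold Spec_generate_variants_multi_vowel; infer_instance

-- ===== CLAIM (what is proved, stated in full; the proofs are below) =====
def Claim_equal_generate_variants_multi_vowel : Prop := ∀ (word : String) (max_variants : Int), Dom_generate_variants_multi_vowel word max_variants → Spec_generate_variants_multi_vowel word max_variants (generate_variants_multi_vowel word max_variants)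

-- ===== LEMMAS AND PROOFS =====

-- the per-character candidate list both versions use
def pvCh (c : Char) : List Char := if pvSubsA.contains c then pvSubsA.getD c [] else [c]

-- the number of combinations (the mixed-radix modulus)
def pvN (ls : List (List Char)) : Nat := (ls.map List.length).prod

-- mathematical big-endian mixed-radix decoding
def pvDec : List (List Char) → Nat → List Char
  | [], _ => []
  | l :: ls, k => l.getD (k / pvN ls) ' ' :: pvDec ls (k % pvN ls)

theorem pvSubsA_items : pvSubsA.items =
    [('e', ['e','o','a']), ('o', ['o','e']), ('a', ['a','e']), ('i', ['i','y']), ('y', ['y','i'])] := by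
  decide

theorem pvSubsB_eq_A : pvSubsB = pvSubsA := by decide

theorem pvChB_eq (c : Char) : pvSubsB.getD c [c] = pvCh c := by
  rw [pvSubsB_eq_A]
  simp only [pvCh, PySem.Dict.getD, PySem.Dict.get?, PySem.Dict.contains, pvSubsA_items,
    List.find?, List.any]
  by_cases h1 : c = 'e'; · subst h1; decide
  by_cases h2 : c = 'o'; · subst h2; decide
  by_cases h3 : c = 'a'; · subst h3; decide
  by_cases h4 : c = 'i'; · subst h4; decide
  by_cases h5 : c = 'y'; · subst h5; decide
  have e1 : ('e' == c) = false := by simp [Ne.symm h1]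
  have e2 : ('o' == c) = false := by simp [Ne.symm h2]
  have e3 : ('a' == c) = false := by simp [Ne.symm h3]
  have e4 : ('i' == c) = false := by simp [Ne.symm h4]
  have e5 : ('y' == c) = false := by simp [Ne.symm h5]
  simp [e1, e2, e3, e4, e5]

theorem pvCh_nodup (c : Char) : (pvCh c).Nodup := by
  simp only [pvCh, PySem.Dict.getD, PySem.Dict.get?, PySem.Dict.contains, pvSubsA_items,
    List.find?, List.any]
  by_cases h1 : c = 'e'; · subst h1; decide
  by_cases h2 : c = 'o'; · subst h2; decide
  by_cases h3 : c = 'a'; · subst h3; decide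
  by_cases h4 : c = 'i'; · subst h4; decide
  by_cases h5 : c = 'y'; · subst h5; decide
  have e1 : ('e' == c) = false := by simp [Ne.symm h1]
  have e2 : ('o' == c) = false := by simp [Ne.symm h2]
  have e3 : ('a' == c) = false := by simp [Ne.symm h3]
  have e4 : ('i' == c) = false := by simp [Ne.symm h4]
  have e5 : ('y' == c) = false := by simp [Ne.symm h5]
  simp [e1, e2, e3, e4, e5]

theorem pvCh_ne_nil (c : Char) : pvCh c ≠ [] := by
  simp only [pvCh, PySem.Dict.getD, PySem.Dict.get?, PySem.Dict.contains, pvSubsA_items,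
    List.find?, List.any]
  by_cases h1 : c = 'e'; · subst h1; decide
  by_cases h2 : c = 'o'; · subst h2; decide
  by_cases h3 : c = 'a'; · subst h3; decide
  by_cases h4 : c = 'i'; · subst h4; decide
  by_cases h5 : c = 'y'; · subst h5; decide
  have e1 : ('e' == c) = false := by simp [Ne.symm h1]
  have e2 : ('o' == c) = false := by simp [Ne.symm h2]
  have e3 : ('a' == c) = false := by simp [Ne.symm h3]
  have e4 : ('i' == c) = false := by simp [Ne.symm h4]
  have e5 : ('y' == c) = false := by simp [Ne.symm h5]
  simp [e1, e2, e3, e4, e5]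

theorem pvN_cons (l : List Char) (ls : List (List Char)) :
    pvN (l :: ls) = l.length * pvN ls := by simp [pvN]

theorem pvN_pos (ls : List (List Char)) (h : ∀ l ∈ ls, l ≠ []) : 0 < pvN ls := by
  induction ls with
  | nil => simp [pvN]
  | cons l ls ih =>
    rw [pvN_cons]
    exact Nat.mul_pos (List.length_pos_iff.mpr (h l (by simp)))
      (ih (fun x hx => h x (by simp [hx])))

theorem pvProductA_length_nat (ls : List (List Char)) :
    (pvProductA ls).length = pvN ls := by
  induction ls with
  | nil => simp [pvProductA, pvN]
  | cons l ls ih =>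
    simp only [pvProductA, List.length_flatMap, List.length_map, pvN_cons, ← ih]
    induction l with
    | nil => simp
    | cons x xs _ => simp; ring

theorem pvProductA_length (ls : List (List Char)) :
    ((pvProductA ls).length : Int) = ls.foldl (fun acc l => acc * (l.length : Int)) 1 := by
  have key : ∀ (ls : List (List Char)) (a : Int),
      ls.foldl (fun acc l => acc * (l.length : Int)) a = a * ((pvProductA ls).length : Int) := by
    intro ls
    induction ls with
    | nil => intro a; simp [pvProductA]
    | cons l ls ih =>
      intro a
      simp only [List.foldl_cons, ih, pvProductA, List.length_flatMap, List.length_map]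
      rw [show (List.map (fun _ => (pvProductA ls).length) l).sum
            = l.length * (pvProductA ls).length from by
        induction l with
        | nil => simp
        | cons x xs _ => simp; ring]
      push_cast; ring
  simpa using (key ls 1).symm

theorem pvProductA_cons_product (l : List Char) (ls : List (List Char)) :
    pvProductA (l :: ls) = (l ×ˢ pvProductA ls).map (fun p => p.1 :: p.2) := by
  simp only [pvProductA, SProd.sprod, List.product, List.map_flatMap]
  exact List.flatMap_congr (fun x _ => by simp [Function.comp])

theorem pvProductA_nodup (ls : List (List Char)) (h : ∀ l ∈ ls, l.Nodup) :
    (pvProductA ls).Nodup := by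
  induction ls with
  | nil => simp [pvProductA]
  | cons l ls ih =>
    rw [pvProductA_cons_product]
    exact ((h l (by simp)).product (ih (fun x hx => h x (by simp [hx])))).map
      (fun p q hpq => by cases p; cases q; simp_all)

-- splitting range (m*n) into m blocks of n
theorem pvRangeMul {α : Type} (m n : Nat) (f : Nat → α) :
    (List.range (m * n)).map f
      = (List.range m).flatMap (fun q => (List.range n).map (fun r => f (q * n + r))) := by
  induction m with
  | zero => simp
  | succ m ih =>
    rw [Nat.succ_mul, List.range_add, List.range_succ]
    simp only [List.map_append, List.flatMap_append, ih, List.flatMap_singleton, List.map_map]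
    congr 1

-- a flatMap over the elements of l, written as a flatMap over its indices
theorem pvFlatMapIdx {α : Type} (l : List Char) (g : Char → List α) :
    (List.range l.length).flatMap (fun q => g (l.getD q ' ')) = l.flatMap g := by
  induction l with
  | nil => simp
  | cons x xs ih =>
    rw [List.length_cons, List.range_succ_eq_map]
    simp only [List.flatMap_cons, List.flatMap_map]
    rw [← ih]
    simp [List.getD]

-- the range of indices decodes to exactly the product list, in order
theorem pvMapRange_dec (ls : List (List Char)) (h : ∀ l ∈ ls, l ≠ []) :
    (List.range (pvN ls)).map (pvDec ls) = pvProductA ls := by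
  induction ls with
  | nil => simp [pvN, pvDec, pvProductA]
  | cons l ls ih =>
    have hN : 0 < pvN ls := pvN_pos ls (fun x hx => h x (by simp [hx]))
    rw [pvN_cons, pvRangeMul, pvProductA]
    rw [← pvFlatMapIdx l (fun x => (pvProductA ls).map (fun r => x :: r))]
    apply List.flatMap_congr
    intro q hq
    rw [← ih (fun x hx => h x (by simp [hx])), List.map_map]
    apply List.map_congr_left
    intro r hr
    have hrn : r < pvN ls := List.mem_range.mp hr
    simp only [Function.comp, pvDec]
    have e1 : (q * pvN ls + r) / pvN ls = q := by
      rw [Nat.mul_comm, Nat.mul_add_div hN, Nat.div_eq_of_lt hrn]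
      omega
    have e2 : (q * pvN ls + r) % pvN ls = r := by
      rw [Nat.add_comm, Nat.add_mul_mod_self_right, Nat.mod_eq_of_lt hrn]
    rw [e1, e2]

-- Source B's reversed divmod loop computes the big-endian digits (general state)
theorem pvDecode_fold (ls : List (List Char)) (h : ∀ l ∈ ls, l ≠ []) (k : Nat)
    (acc : List Char) :
    ls.reverse.foldl
        (fun (s : List Char × Int) p =>
          (s.1 ++ [(PySem.List.pyGet? p (PySem.Int.mod s.2 (p.length : Int))).getD ' '],
           PySem.Int.floordiv s.2 (p.length : Int)))
        (acc, (k : Int))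
      = (acc ++ (pvDec ls (k % pvN ls)).reverse, ((k / pvN ls : Nat) : Int)) := by
  induction ls generalizing k acc with
  | nil => simp [pvN, pvDec]
  | cons l ls ih =>
    have hl : l ≠ [] := h l (by simp)
    have hL : 0 < l.length := List.length_pos_iff.mpr hl
    have hN : 0 < pvN ls := pvN_pos ls (fun x hx => h x (by simp [hx]))
    rw [List.reverse_cons, List.foldl_append,
      ih (fun x hx => h x (by simp [hx])) k acc]
    simp only [List.foldl_cons, List.foldl_nil, PySem.Int.mod_natCast,
      PySem.Int.floordiv_natCast]
    have hidx : k / pvN ls % l.length < l.length := Nat.mod_lt _ hL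
    rw [PySem.List.pyGet?_natCast l _]
    have e1 : k % (l.length * pvN ls) % pvN ls = k % pvN ls :=
      Nat.mod_mod_of_dvd k ⟨l.length, Nat.mul_comm _ _⟩
    have e2 : k % (l.length * pvN ls) / pvN ls = k / pvN ls % l.length := by
      rw [Nat.mul_comm l.length (pvN ls)]
      exact Nat.mod_mul_right_div_self k (pvN ls) l.length
    have e3 : (pvDec (l :: ls) (k % pvN (l :: ls))).reverse
        = (pvDec ls (k % pvN ls)).reverse ++ [l[k / pvN ls % l.length]?.getD ' '] := by
      simp only [pvDec, pvN_cons, e1, e2, List.reverse_cons]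
      rw [List.getD_eq_getElem?_getD, List.getElem?_eq_getElem hidx]
    have e4 : k / pvN (l :: ls) = k / pvN ls / l.length := by
      rw [pvN_cons, Nat.mul_comm, Nat.div_div_eq_div_mul]
    rw [e3, e4, ← List.append_assoc]

theorem pvDecode_eq (ls : List (List Char)) (h : ∀ l ∈ ls, l ≠ []) (k : Nat)
    (hk : k < pvN ls) : pvDecode ls (k : Int) = pvDec ls k := by
  unfold pvDecode
  rw [pvDecode_fold ls h k []]
  simp [Nat.mod_eq_of_lt hk]

-- A's add/break loop over pairwise-distinct fresh items appends the first max(m-|acc|,1) of them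
theorem pvAddLoop_eq {α : Type} (m : Int) (g : α → String) (cs : List α) (acc : List String)
    (hn : (cs.map g).Nodup) (hf : ∀ c ∈ cs, g c ∉ acc) :
    pvAddLoop m g cs acc = acc ++ (cs.map g).take (max (m - acc.length) 1).toNat := by
  induction cs generalizing acc with
  | nil => simp [pvAddLoop]
  | cons c cs ih =>
    have hfresh : g c ∉ acc := hf c (by simp)
    have hadd : PySem.Set.add acc (g c) = acc ++ [g c] := by
      simp [PySem.Set.add, PySem.Set.contains, hfresh]
    simp only [pvAddLoop, hadd]
    by_cases hm : m ≤ PySem.Set.len (acc ++ [g c])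
    · rw [if_pos hm]
      have ht : (max (m - acc.length) 1).toNat = 1 := by
        simp [PySem.Set.len] at hm; omega
      simp [ht]
    · rw [if_neg hm]
      have hm' : (acc.length : Int) + 1 < m := by
        simp [PySem.Set.len] at hm; omega
      rw [ih (acc ++ [g c]) (List.nodup_cons.mp hn).2 ?_]
      · have h1 : (max (m - acc.length) 1).toNat
            = (max (m - (acc ++ [g c]).length) 1).toNat + 1 := by
          simp; omega
        simp [h1, List.take_succ_cons, List.append_assoc]
      · intro d hd
        simp only [List.mem_append, List.mem_singleton]
        push Not
        refine ⟨hf d (by simp [hd]), ?_⟩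
        intro hgd
        exact (List.nodup_cons.mp hn).1 (hgd ▸ List.mem_map_of_mem hd)

-- A's pySetD-assignments are List.set-assignments (positions in range, lengths preserved)
theorem pvAssignA_eq_set (pcs : List ((Int × Char) × Char)) (w0 : List Char)
    (h : ∀ pc ∈ pcs, 0 ≤ pc.1.1 ∧ pc.1.1.toNat < w0.length) :
    pvAssignA w0 pcs = pcs.foldl (fun v pc => v.set pc.1.1.toNat pc.2) w0 := by
  induction pcs generalizing w0 with
  | nil => rfl
  | cons pc pcs ih =>
    obtain ⟨h0, h1⟩ := h pc (by simp)
    have hset : PySem.List.pySetD w0 pc.1.1 pc.2 = w0.set pc.1.1.toNat pc.2 :=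
      PySem.List.pySetD_of_nonneg w0 pc.2 h0
    simp only [pvAssignA, List.foldl_cons] at *
    rw [hset, ih]
    intro q hq
    have := h q (by simp [hq])
    simpa using this

theorem pvOfList_injective : Function.Injective String.ofList := fun a b h => by
  have := congrArg String.toList h
  simpa using this

-- membership facts for the filtered enumerate
theorem pvEnumFilter_mem (L : List Char) (f : Int × Char → Bool) (q : Int × Char)
    (h : q ∈ (PySem.List.enumerate L).filter f) : 0 ≤ q.1 ∧ q.1.toNat < L.length := by
  have h2 := (PySem.List.mem_enumerate_iff L 0 q).mp (List.mem_of_mem_filter h)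
  obtain ⟨k, hk, rfl⟩ := h2
  refine ⟨by simp, by simp; omega⟩

-- value of a fold of sets at an untouched index
theorem pvFoldSet_get_untouched (pcs : List (Int × Char)) (r : List Char) (q : Nat)
    (h : ∀ pc ∈ pcs, pc.1.toNat ≠ q) :
    (pcs.foldl (fun v pc => v.set pc.1.toNat pc.2) r)[q]? = r[q]? := by
  induction pcs generalizing r with
  | nil => rfl
  | cons pc pcs ih =>
    simp only [List.foldl_cons]
    rw [ih _ (fun x hx => h x (by simp [hx]))]
    exact List.getElem?_set_ne (h pc (by simp))

-- value of a fold of sets at a set position (positions pairwise distinct)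
theorem pvFoldSet_get (pcs : List (Int × Char)) (r : List Char)
    (hp : List.Pairwise (fun a b => a.1.toNat ≠ b.1.toNat) pcs)
    (hr : ∀ pc ∈ pcs, pc.1.toNat < r.length) :
    ∀ pc ∈ pcs, (pcs.foldl (fun v pc => v.set pc.1.toNat pc.2) r)[pc.1.toNat]? = some pc.2 := by
  induction pcs generalizing r with
  | nil => simp
  | cons pc0 pcs ih =>
    intro pc hpc
    rcases List.mem_cons.mp hpc with heq | htail
    · subst heq
      simp only [List.foldl_cons]
      rw [pvFoldSet_get_untouched _ _ _
        (fun x hx => ((List.pairwise_cons.mp hp).1 x hx).symm)]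
      simp [hr pc (by simp)]
    · simp only [List.foldl_cons]
      exact ih (r.set pc0.1.toNat pc0.2) (List.pairwise_cons.mp hp).2
        (fun x hx => by simpa using hr x (by simp [hx])) pc htail

-- the e/o assignment function both fallbacks compute
def pvGB (L : List Char) (pos : List Int) (combo : List Char) : String :=
  String.ofList ((pos.zip combo).foldl (fun v pc => v.set pc.1.toNat pc.2) L)

-- injectivity of the assignment on same-length combos over strictly increasing positions
theorem pvGB_injOn (L : List Char) (pos : List Int)
    (hpos : ∀ p ∈ pos, 0 ≤ p ∧ p.toNat < L.length)
    (hpair : List.Pairwise (· < ·) pos)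
    (c c' : List Char) (hc : c.length = pos.length) (hc' : c'.length = pos.length)
    (h : pvGB L pos c = pvGB L pos c') : c = c' := by
  have hfold := pvOfList_injective h
  have hposNat : List.Pairwise (fun a b : Int => a.toNat ≠ b.toNat) pos :=
    hpair.imp_of_mem (fun ha hb hab => by
      have h1 := (hpos _ ha).1
      omega)
  have hzp : ∀ (d : List Char), pos.length ≤ d.length →
      List.Pairwise (fun a b : Int × Char => a.1.toNat ≠ b.1.toNat) (pos.zip d) := by
    intro d hd
    have h2 : List.Pairwise (fun a b : Int => a.toNat ≠ b.toNat)
        (List.map Prod.fst (pos.zip d)) := by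
      rw [List.map_fst_zip hd]; exact hposNat
    have h3 := (List.pairwise_map (f := (Prod.fst : Int × Char → Int))).mp h2
    exact h3
  have hr : ∀ (d : List Char), ∀ pc ∈ pos.zip d, pc.1.toNat < L.length := by
    intro d pc hpc
    exact (hpos pc.1 ((List.of_mem_zip (by simpa using hpc)).1)).2
  apply List.ext_getElem (by omega)
  intro j hj hj'
  have hjp : j < pos.length := by omega
  have hjz : j < (pos.zip c).length := by simp [List.length_zip]; omega
  have hjz' : j < (pos.zip c').length := by simp [List.length_zip]; omega
  have g1 := pvFoldSet_get (pos.zip c) L (hzp c (by omega)) (hr c) _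
    (List.getElem_mem hjz)
  have g2 := pvFoldSet_get (pos.zip c') L (hzp c' (by omega)) (hr c') _
    (List.getElem_mem hjz')
  rw [List.getElem_zip] at g1 g2
  rw [hfold] at g1
  rw [g2] at g1
  exact (Option.some.inj g1).symm

-- the fallback branches agree
set_option maxHeartbeats 1000000 in
theorem pvEo_eq (word : String) (max_variants : Int) :
    generate_variants_eo_only word max_variants
      = pvEoFallback (PySem.Str.stripChars (PySem.Str.lower word) ".,;:!?") max_variants := by
  unfold generate_variants_eo_only pvEoFallback
  dsimp only
  set wc := PySem.Str.stripChars (PySem.Str.lower word) ".,;:!?" with hwc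
  set L := wc.toList with hL
  set eo := (PySem.List.enumerate L).filter (fun p => p.2 == 'e' || p.2 == 'o') with heo
  set pos := eo.map (fun p : Int × Char => p.1) with hposdef
  have hlen : pos.length = eo.length := by simp [hposdef]
  rw [hlen]
  by_cases h5 : 5 < (eo.length : Int)
  · rw [if_pos h5, if_pos h5]
  · rw [if_neg h5, if_neg h5]
    have hq : ∀ q ∈ eo, 0 ≤ q.1 ∧ q.1.toNat < L.length := by
      intro q hq
      exact pvEnumFilter_mem L _ q (heo ▸ hq)
    have hposmem : ∀ p ∈ pos, 0 ≤ p ∧ p.toNat < L.length := by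
      intro p hp
      obtain ⟨q, hq2, rfl⟩ := List.mem_map.mp (hposdef ▸ hp)
      exact hq q hq2
    have hpair : List.Pairwise (· < ·) pos := by
      refine List.pairwise_map.mpr ?_
      exact (PySem.List.pairwise_lt_enumerate L 0).filter _
    set n := eo.length with hn
    have hlen' : pos.length = n := hlen
    set P := pvProductA (List.replicate n ['e','o']) with hP
    have hrepne : ∀ l ∈ List.replicate n (['e','o'] : List Char), l ≠ [] := by
      intro l hl
      rw [List.eq_of_mem_replicate hl]; decide
    have hNrep : pvN (List.replicate n ['e','o']) = 2 ^ n := by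
      induction n with
      | zero => simp [pvN]
      | succ m ihm => rw [List.replicate_succ, pvN_cons] at *; simp [ihm]; ring
    have hPn : P.Nodup := pvProductA_nodup _ (by
      intro l hl
      rw [List.eq_of_mem_replicate hl]; decide)
    have hPlen : ∀ c ∈ P, c.length = pos.length := by
      intro c hc
      have hmlen : ∀ (m : Nat) (c : List Char),
          c ∈ pvProductA (List.replicate m ['e','o']) → c.length = m := by
        intro m
        induction m with
        | zero => intro c hc; simp [pvProductA] at hc; simp [hc]
        | succ mm ihm =>
          intro c hc
          rw [List.replicate_succ] at hc
          simp only [pvProductA, List.mem_flatMap, List.mem_map] at hc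
          obtain ⟨x, _, r, hr, rfl⟩ := hc
          simp [ihm r hr]
      rw [hlen]
      exact hmlen n c (hP ▸ hc)
    have gA_eq : ∀ combo ∈ P,
        String.ofList (pvAssignA L (eo.zip combo)) = pvGB L pos combo := by
      intro combo _
      rw [pvAssignA_eq_set _ _ (by
        rintro ⟨q, ch⟩ hpc
        exact hq q (List.of_mem_zip hpc).1)]
      unfold pvGB
      apply congrArg
      rw [hposdef, List.zip_map_left, List.foldl_map]
      simp only [Prod.map_fst, Prod.map_snd, id_eq]
    have hmap : P.map (fun combo => String.ofList (pvAssignA L (eo.zip combo)))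
        = P.map (pvGB L pos) := List.map_congr_left gA_eq
    have hnodup : (P.map (pvGB L pos)).Nodup :=
      hPn.map_on (fun x hx y hy hxy =>
        pvGB_injOn L pos hposmem hpair x y (hPlen x hx) (hPlen y hy) hxy)
    -- A side: the add/break loop takes the first max(max_variants,1) decoded variants
    rw [pvAddLoop_eq max_variants _ P []
      (by rw [hmap]; exact hnodup) (by simp)]
    rw [hmap]
    simp only [List.nil_append, List.length_nil, Int.ofNat_zero, sub_zero]
    -- B side: the closed-form range over limit
    set limit := min ((2 : Int) ^ n) (max max_variants 1) with hlimit
    have hE1 : (0:Int) < (2:Int) ^ n := by positivity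
    have hlim0 : 0 ≤ limit := by
      rw [hlimit]
      have : (1:Int) ≤ max max_variants 1 := le_max_right _ _
      omega
    have hpr : PySem.List.pyRange 0 limit 1 = (List.range limit.toNat).map (fun k : Nat => (k : Int)) := by
      rw [PySem.List.pyRange_one 0 limit]
      simp
    rw [hpr, List.map_map]
    simp only [Function.comp_def]
    have hBfun : ∀ k ∈ List.range limit.toNat,
        String.ofList ((pos.zip (pvDecode (List.replicate n ['e','o']) (k : Int))).foldl
            (fun chars pc => PySem.List.pySetD chars pc.1 pc.2) L)
          = pvGB L pos (pvDec (List.replicate n ['e','o']) k) := by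
      intro k hk
      have hkr := List.mem_range.mp hk
      have h3 : ((2:Int) ^ n).toNat = 2 ^ n := by
        rw [show ((2:Int) ^ n) = ((2 ^ n : Nat) : Int) by push_cast; ring]
        exact Int.toNat_natCast _
      have hk2 : k < 2 ^ n := by
        have h2 : limit.toNat ≤ ((2:Int) ^ n).toNat := by rw [hlimit]; omega
        omega
      rw [pvDecode_eq _ hrepne k (by rw [hNrep]; exact hk2)]
      unfold pvGB
      apply congrArg
      apply PySem.List.foldl_congr_mem
      intro chars pc hpc
      exact PySem.List.pySetD_of_nonneg chars pc.2
        (hposmem pc.1 (List.of_mem_zip hpc).1).1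
    rw [List.map_congr_left hBfun]
    have h3 : ((2:Int) ^ n).toNat = 2 ^ n := by
      rw [show ((2:Int) ^ n) = ((2 ^ n : Nat) : Int) by push_cast; ring]
      exact Int.toNat_natCast _
    have hle : limit.toNat ≤ 2 ^ n := by rw [hlimit]; omega
    have hrangesplit : List.range limit.toNat = (List.range (2 ^ n)).take limit.toNat := by
      rw [List.take_range, Nat.min_eq_left hle]
    rw [hrangesplit, List.map_take]
    try rw [List.map_take]
    rw [show (List.range (2 ^ n)).map (fun a => pvGB L pos (pvDec (List.replicate n ['e','o']) a))
        = P.map (pvGB L pos) from by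
      rw [show (fun a => pvGB L pos (pvDec (List.replicate n ['e','o']) a))
          = pvGB L pos ∘ pvDec (List.replicate n ['e','o']) from rfl]
      rw [← List.map_map, ← hNrep, pvMapRange_dec _ hrepne, hP]]
    rw [List.take_eq_take_iff]
    have hlenP : (P.map (pvGB L pos)).length = 2 ^ n := by
      simp [hP, pvProductA_length_nat, hNrep]
    rw [hlenP]
    have h3 : ((2:Int) ^ n).toNat = 2 ^ n := by
        rw [show ((2:Int) ^ n) = ((2 ^ n : Nat) : Int) by push_cast; ring]
        exact Int.toNat_natCast _
    rw [hlimit]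
    omega

-- ===== the head-to-head equivalence =====
set_option maxHeartbeats 1000000 in
theorem generate_variants_multi_vowel_spec' (word : String) (max_variants : Int) :
    generate_variants_multi_vowel word max_variants
      = generate_variants_multi_vowel_alt word max_variants := by
  unfold generate_variants_multi_vowel generate_variants_multi_vowel_alt
  dsimp only
  set wc := PySem.Str.stripChars (PySem.Str.lower word) ".,;:!?" with hwc
  set L := wc.toList with hL
  have hsnd : ((PySem.List.enumerate L).map
      (fun p => if pvSubsA.contains p.2 then (p.1, pvSubsA.getD p.2 []) else (p.1, [p.2]))).map
        (fun p : Int × List Char => p.2) = L.map pvCh := by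
    rw [List.map_map]
    have hfun : ((fun p : Int × List Char => p.2) ∘
        (fun p : Int × Char =>
          if pvSubsA.contains p.2 then (p.1, pvSubsA.getD p.2 []) else (p.1, [p.2])))
        = (fun p : Int × Char => pvCh p.2) := by
      funext p
      by_cases h : pvSubsA.contains p.2 <;> simp [pvCh, h, Function.comp]
    rw [hfun]
    rw [show (fun p : Int × Char => pvCh p.2) = pvCh ∘ (fun p : Int × Char => p.2) from rfl,
      ← List.map_map, PySem.List.map_snd_enumerate]
  have hparts : L.map (fun c => pvSubsB.getD c [c]) = L.map pvCh :=
    List.map_congr_left (fun c _ => pvChB_eq c)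
  have hTA : List.foldl (fun acc p => acc * (p.2.length : Int)) 1
      ((PySem.List.enumerate L).map
        (fun p => if pvSubsA.contains p.2 then (p.1, pvSubsA.getD p.2 []) else (p.1, [p.2])))
      = List.foldl (fun acc l => acc * (l.length : Int)) 1 (L.map pvCh) := by
    rw [← hsnd]
    simp only [List.foldl_map]
  have hTB : List.foldl (fun acc p => acc * (p.length : Int)) 1
      (L.map (fun c => pvSubsB.getD c [c]))
      = List.foldl (fun acc l => acc * (l.length : Int)) 1 (L.map pvCh) := by
    rw [hparts]
  rw [hTA, hTB]
  set T := List.foldl (fun acc l => acc * (l.length : Int)) 1 (L.map pvCh) with hT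
  have hTN : T = ((pvN (L.map pvCh) : Nat) : Int) := by
    rw [hT, ← pvProductA_length, pvProductA_length_nat]
  by_cases hguard : max_variants < T
  · rw [if_pos hguard, if_pos hguard]
    exact pvEo_eq word max_variants
  · rw [if_neg hguard, if_neg hguard]
    rw [hsnd, hparts]
    set parts := L.map pvCh with hpartsdef
    have hne : ∀ l ∈ parts, l ≠ [] := by
      intro l hl
      obtain ⟨c, _, rfl⟩ := List.mem_map.mp (hpartsdef ▸ hl)
      exact pvCh_ne_nil c
    have hnodP : (pvProductA parts).Nodup :=
      pvProductA_nodup _ (fun l hl => by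
        obtain ⟨c, _, rfl⟩ := List.mem_map.mp (hpartsdef ▸ hl)
        exact pvCh_nodup c)
    have hnod : ((pvProductA parts).map (fun combo => String.ofList combo)).Nodup :=
      hnodP.map_on (fun x _ y _ hxy => pvOfList_injective hxy)
    rw [pvAddLoop_eq max_variants _ _ [] hnod (by simp)]
    have hlenP : ((pvProductA parts).length : Int) = T := pvProductA_length _
    rw [List.take_of_length_le (by
      simp only [List.length_map, List.length_nil]
      omega)]
    -- B side
    have hTnat : T.toNat = pvN parts := by rw [hTN]; exact Int.toNat_natCast _
    have hpr : PySem.List.pyRange 0 T 1 = (List.range (pvN parts)).map (fun k : Nat => (k : Int)) := by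
      rw [PySem.List.pyRange_one 0 T]
      rw [sub_zero, hTnat]
      simp
    rw [hpr, List.map_map]
    simp only [Function.comp_def]
    have hBfun : ∀ k ∈ List.range (pvN parts),
        String.ofList (pvDecode parts (k : Int)) = String.ofList (pvDec parts k) := by
      intro k hk
      rw [pvDecode_eq parts hne k (List.mem_range.mp hk)]
    rw [List.map_congr_left hBfun]
    rw [show (List.range (pvN parts)).map (fun k => String.ofList (pvDec parts k))
        = ((List.range (pvN parts)).map (pvDec parts)).map String.ofList from by
      rw [List.map_map]; rfl]
    rw [pvMapRange_dec parts hne]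
    simp

-- ===== VERDICT (by name: the statement is the Claim_ definition above) =====
theorem generate_variants_multi_vowel_spec : Claim_equal_generate_variants_multi_vowel := by
  intro word max_variants _
  exact generate_variants_multi_vowel_spec' word max_variants
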